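-- pv_equiv track=rewrite | github.com/DhiaNeifar/my-leetcode-solutions | 3576 - Transform Array to All Equal Elements.py | canMakeEqual
-- ===== SOURCE A (Python) =====
-- from typing import List
--
-- def canMakeEqual(nums: List[int], k: int) -> bool:
--     freq = {-1: [], 1: []}
--     for index, num in enumerate(nums):
--         freq[num].append(index)
--
--     if len(freq[-1]) % 2 == 1 and len(freq[1]) % 2 == 1:
--         return False
--     result = []
--     for key in freq:
--         l = freq[key]
--         m = 0
--         if len(l) % 2 == 0:
--             for i in range(0, len(l), 2):
--                 m += l[i + 1] - l[i] - 1
--             m += len(l) // 2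
--             result.append(m)
--     return min(result) <= k
-- ===== SOURCE B (Python) =====
-- from typing import List
--
-- def canMakeEqual(nums: List[int], k: int) -> bool:
--     # Translate the two symbols to flip bits, then count, for each target,
--     # the positions whose prefix mismatch-parity is odd: that is exactly the
--     # number of adjacent flip operations; feasible iff the total parity is even.
--     flip = {1: False, -1: True}
--     bits = [flip[x] for x in nums]
--     best = None
--     for target in (False, True):
--         par, ops = False, 0
--         for b in bits:
--             par ^= b ^ target
--             ops += par
--         if not par and (best is None or ops < best):
--             best = ops
--     return best is not None and best <= k
-- ===== Notes on version B (the rewrite author's own statement) =====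
-- stated objective: alternative
-- what changed: A groups indices by value into per-value lists and sums paired index gaps; B translates the two symbols to flip bits and, for each target, counts in one pass the positions whose prefix mismatch-parity is odd (feasible iff the total parity is even), keeping the smaller feasible count. Pre_ excludes inputs containing an element outside {-1, 1}, on which both programs raise KeyError.
import Mathlib
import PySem

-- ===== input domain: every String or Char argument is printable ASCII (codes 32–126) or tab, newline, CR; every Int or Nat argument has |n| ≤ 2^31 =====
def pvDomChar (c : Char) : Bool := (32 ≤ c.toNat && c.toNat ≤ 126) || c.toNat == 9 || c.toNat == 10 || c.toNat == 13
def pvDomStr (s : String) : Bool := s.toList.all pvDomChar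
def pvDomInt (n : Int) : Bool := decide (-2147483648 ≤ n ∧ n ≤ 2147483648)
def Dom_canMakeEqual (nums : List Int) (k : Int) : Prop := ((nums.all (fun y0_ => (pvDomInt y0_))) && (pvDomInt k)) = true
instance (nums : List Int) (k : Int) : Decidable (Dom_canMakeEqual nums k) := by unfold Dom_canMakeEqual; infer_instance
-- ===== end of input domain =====

-- B replaces A's per-value index-list pairing by per-target prefix mismatch-parity
-- counting over a bit translation of the array (objective: alternative algorithm, same cost).

-- ===== PORT A =====
-- Literal port of A. `freq[num].append(index)` is `Dict.modify num [] (· ++ [index])`,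
-- exact on Pre_ (num ∈ {-1,1}, the dict's keys); outside Pre_ Python raises KeyError.
-- `l[i]`/`l[i+1]` are `pyGetD … 0`, exact here since the range keeps both in bounds.
def canMakeEqual (nums : List Int) (k : Int) : Bool :=
  let freq0 : PySem.Dict Int (List Int) := (PySem.Dict.empty.insert (-1) []).insert 1 []
  let freq := (PySem.List.enumerate nums 0).foldl
    (fun d p => d.modify p.2 [] (fun l => l ++ [p.1])) freq0
  if (freq.getD (-1) []).length % 2 == 1 && (freq.getD 1 []).length % 2 == 1 then
    false
  else
    let result := freq.keys.foldl (fun res key =>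
      let l := freq.getD key []
      if l.length % 2 == 0 then
        let m := (PySem.List.pyRange 0 (l.length) 2).foldl
          (fun m i => m + (PySem.List.pyGetD l (i + 1) 0 - PySem.List.pyGetD l i 0 - 1)) 0
        let m := m + PySem.Int.floordiv (l.length) 2
        res ++ [m]
      else res) ([] : List Int)
    match PySem.List.min? result (fun x => x) with
    | some mn => decide (mn ≤ k)
    | none => false  -- min of empty list: unreachable (some key count is even)

-- ===== PORT B =====
-- Port of Source B: translate the symbols to flip bits via the table {1: False, -1: True}
-- (Python raises KeyError outside the table; those inputs are outside Pre_, the port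
-- uses getD false there), then for each target count prefix mismatch-parities.
def canMakeEqual_alt (nums : List Int) (k : Int) : Bool :=
  let flip : PySem.Dict Int Bool := (PySem.Dict.empty.insert 1 false).insert (-1) true
  let bits := nums.map (fun x => flip.getD x false)
  let best := ([false, true] : List Bool).foldl (fun best target =>
    let s := bits.foldl (fun (s : Bool × Int) b =>
      let par := s.1 ^^ (b ^^ target)
      (par, s.2 + if par then 1 else 0)) (false, (0 : Int))
    if !s.1 && (match best with | none => true | some b0 => decide (s.2 < b0)) then
      some s.2
    else best) (none : Option Int)
  match best with
  | some b => decide (b ≤ k)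
  | none => false

-- ===== PRECONDITION & SPEC =====
-- A raises KeyError on any element outside {-1, 1}; Pre_ excludes exactly those inputs.
def Pre_canMakeEqual (nums : List Int) (k : Int) : Prop := ∀ x ∈ nums, x = 1 ∨ x = -1
instance (nums : List Int) (k : Int) : Decidable (Pre_canMakeEqual nums k) := by
  unfold Pre_canMakeEqual; infer_instance
def pvWitness_canMakeEqual : List Int × Int := ([1, -1, -1, 1], 2)

def Spec_canMakeEqual (nums : List Int) (k : Int) (out : Bool) : Prop := out = canMakeEqual_alt nums k
instance (nums : List Int) (k : Int) (out : Bool) : Decidable (Spec_canMakeEqual nums k out) := by unfold Spec_canMakeEqual; infer_instance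

-- ===== CLAIM (what is proved, stated in full; the proofs are below) =====
def Claim_equal_canMakeEqual : Prop := ∀ (nums : List Int) (k : Int), Dom_canMakeEqual nums k → Pre_canMakeEqual nums k → Spec_canMakeEqual nums k (canMakeEqual nums k)

-- ===== LEMMAS AND PROOFS =====

-- Indices (from 0) of the true entries.
def trueIdx : List Bool → List Int
  | [] => []
  | w :: ws => if w then 0 :: (trueIdx ws).map (· + 1) else (trueIdx ws).map (· + 1)

-- Paired-gap sum Σ (l[2i+1] - l[2i]) as an option (none on odd length).
def psOpt : List Int → Option Int
  | [] => some 0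
  | [_] => none
  | a :: b :: r => (psOpt r).map (· + (b - a))

-- A's inner-loop value Σ (l[2i+1] - l[2i] - 1) (junk 0 on a trailing singleton).
def psVal : List Int → Int
  | [] => 0
  | [_] => 0
  | a :: b :: r => (b - a - 1) + psVal r

-- Index list of the occurrences of u (A's freq[u]).
def idxOf (u : Int) (nums : List Int) : List Int :=
  ((PySem.List.enumerate nums 0).filter (fun p => p.2 == u)).map (·.1)

lemma psOpt_shift (d : Int) : ∀ l : List Int, psOpt (l.map (· + d)) = psOpt l := by
  intro l
  induction l using psOpt.induct with
  | case1 => rfl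
  | case2 a => rfl
  | case3 a b r ih => simp [psOpt, ih]

lemma psOpt_even_odd : ∀ l : List Int,
    psOpt l = if l.length % 2 = 0 then some (psVal l + ((l.length / 2 : Nat) : Int)) else none := by
  intro l
  induction l using psOpt.induct with
  | case1 => simp [psOpt, psVal]
  | case2 a => simp [psOpt, psVal]
  | case3 a b r ih =>
    simp only [psOpt, psVal, ih, List.length_cons]
    rcases Nat.even_or_odd r.length with h | h
    · have h2 : r.length % 2 = 0 := Nat.even_iff.mp h
      simp [h2, Nat.add_mod]
      omega
    · have h2 : r.length % 2 = 1 := Nat.odd_iff.mp h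
      simp [h2, Nat.add_mod]

lemma psOpt_trueIdx_step (w : Bool) (ws : List Bool) :
    psOpt (trueIdx (true :: w :: ws)) = (psOpt (trueIdx ((!w) :: ws))).map (· + 1) := by
  cases w with
  | true =>
    show psOpt (0 :: List.map (· + 1) (0 :: List.map (· + 1) (trueIdx ws)))
        = (psOpt (List.map (· + 1) (trueIdx ws))).map (· + 1)
    rw [List.map_cons, psOpt_shift]
    show (psOpt (List.map (· + 1) (List.map (· + 1) (trueIdx ws)))).map (· + (0 + 1 - 0))
        = (psOpt (trueIdx ws)).map (· + 1)
    rw [psOpt_shift, psOpt_shift]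
    cases psOpt (trueIdx ws) <;> simp
  | false =>
    show psOpt (0 :: List.map (· + 1) (List.map (· + 1) (trueIdx ws)))
        = (psOpt (0 :: List.map (· + 1) (trueIdx ws))).map (· + 1)
    cases hT : trueIdx ws with
    | nil => simp [psOpt]
    | cons a r =>
      simp only [hT, List.map_cons]
      show (psOpt (List.map (· + 1) (List.map (· + 1) r))).map (· + (a + 1 + 1 - 0))
          = ((psOpt (List.map (· + 1) r)).map (· + (a + 1 - 0))).map (· + 1)
      rw [psOpt_shift, psOpt_shift]
      cases psOpt r <;> simp <;> ring

lemma trueIdx_shift (u : Int) : ∀ (nums : List Int) (s : Int),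
    ((PySem.List.enumerate nums s).filter (fun p => p.2 == u)).map (·.1)
      = (trueIdx (nums.map (fun x => x == u))).map (· + s) := by
  intro nums
  induction nums with
  | nil => intro s; rfl
  | cons x xs ih =>
    intro s
    rw [PySem.List.enumerate_cons]
    have hcomp : ((fun x : Int => x + s) ∘ fun x : Int => x + 1) = fun x : Int => x + (s + 1) :=
      funext fun x => by simp [Function.comp]; ring
    by_cases hx : (x == u) = true
    · simp only [List.map_cons, trueIdx, if_pos hx, List.filter_cons, hx]
      simp [List.map_map, ih (s + 1), hcomp]
    · simp only [List.map_cons, trueIdx, if_neg hx, List.filter_cons, hx]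
      simp [List.map_map, ih (s + 1), hcomp]

lemma trueIdx_map_eq_idxOf (u : Int) (nums : List Int) :
    trueIdx (nums.map (fun x => x == u)) = idxOf u nums := by
  unfold idxOf
  rw [trueIdx_shift]
  simp

-- B's inner loop as a structural recursion: (operation count, final parity).
def pp : Bool → List Bool → Int × Bool
  | c, [] => (0, c)
  | c, w :: ws =>
    let p := c ^^ w
    let r := pp p ws
    (r.1 + (if p then 1 else 0), r.2)

lemma pp_carry (w : Bool) (ws : List Bool) : pp true (w :: ws) = pp false ((!w) :: ws) := by
  cases w <;> simp [pp]

lemma pp_false_eq : ∀ ws : List Bool,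
    psOpt (trueIdx ws) = if (pp false ws).2 then none else some (pp false ws).1 := by
  intro ws
  induction hn : ws.length using Nat.strong_induction_on generalizing ws with
  | _ n ih =>
    subst hn
    match ws with
    | [] => simp [pp, trueIdx, psOpt]
    | false :: ws' =>
      have h1 : pp false (false :: ws') = ((pp false ws').1, (pp false ws').2) := by
        simp [pp]
      have h2 : trueIdx (false :: ws') = (trueIdx ws').map (· + 1) := by simp [trueIdx]
      rw [h1, h2, psOpt_shift, ih ws'.length (by simp) ws' rfl]
    | [true] => simp [pp, trueIdx, psOpt]
    | true :: w' :: ws'' =>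
      have h1 : pp false (true :: w' :: ws'')
          = ((pp false ((!w') :: ws'')).1 + 1, (pp false ((!w') :: ws'')).2) := by
        have h0 : pp false (true :: w' :: ws'')
            = ((pp true (w' :: ws'')).1 + 1, (pp true (w' :: ws'')).2) := by
          simp [pp]
        rw [h0, pp_carry]
      rw [h1, psOpt_trueIdx_step, ih (ws''.length + 1) (by simp) ((!w') :: ws'') rfl]
      cases (pp false ((!w') :: ws'')).2 <;> simp

lemma foldl_pp : ∀ (ws : List Bool) (c : Bool) (o : Int),
    ws.foldl (fun (s : Bool × Int) w => (s.1 ^^ w, s.2 + if s.1 ^^ w then 1 else 0)) (c, o)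
      = ((pp c ws).2, o + (pp c ws).1) := by
  intro ws
  induction ws with
  | nil => intro c o; simp [pp]
  | cons w ws ih =>
    intro c o
    rw [List.foldl_cons, ih]
    cases h : c ^^ w <;> simp [pp, h] <;> ring

lemma pyGetD_cons_succ {x : Int} {xs : List Int} {i : Int} (hi : 0 ≤ i) :
    PySem.List.pyGetD (x :: xs) (i + 1) 0 = PySem.List.pyGetD xs i 0 := by
  rw [PySem.List.pyGetD_of_nonneg _ _ (by omega), PySem.List.pyGetD_of_nonneg _ _ hi]
  have : (i + 1).toNat = i.toNat + 1 := by omega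
  rw [this, List.getD_cons_succ]

lemma pyRange_two_cons (m : Nat) :
    PySem.List.pyRange 0 ((m : Int) + 2) 2 = 0 :: (PySem.List.pyRange 0 m 2).map (· + 2) := by
  rw [PySem.List.pyRange_of_pos _ _ (by norm_num), PySem.List.pyRange_of_pos _ _ (by norm_num)]
  have h1 : (0 : Int) < (m : Int) + 2 := by omega
  rw [if_pos h1]
  have h2 : (((m : Int) + 2 - 0 + 2 - 1) / 2).toNat = (if (0:Int) < m then (((m:Int) - 0 + 2 - 1)/2).toNat else 0) + 1 := by
    split_ifs with h <;> omega
  rw [h2, List.range_succ_eq_map]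
  simp [List.map_map, Function.comp]
  intro a _; push_cast; ring

lemma range_fold_eq_psVal : ∀ l : List Int, l.length % 2 = 0 → ∀ acc : Int,
    (PySem.List.pyRange 0 (l.length) 2).foldl
      (fun m i => m + (PySem.List.pyGetD l (i + 1) 0 - PySem.List.pyGetD l i 0 - 1)) acc
      = acc + psVal l := by
  intro l
  induction l using psVal.induct with
  | case1 => intro _ acc; simp [psVal, PySem.List.pyRange]
  | case2 a => intro h; simp at h
  | case3 a b r ih =>
    intro heven acc
    have hlen : ((a :: b :: r).length : Int) = (r.length : Int) + 2 := by simp; ring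
    rw [hlen, pyRange_two_cons, List.foldl_cons, List.foldl_map]
    have hfirst : acc + (PySem.List.pyGetD (a :: b :: r) (0 + 1) 0 - PySem.List.pyGetD (a :: b :: r) 0 0 - 1)
        = acc + (b - a - 1) := by
      norm_num [PySem.List.pyGetD_ofNat']
    rw [hfirst]
    have hcongr : (PySem.List.pyRange 0 r.length 2).foldl
        (fun m i => m + (PySem.List.pyGetD (a :: b :: r) (i + 2 + 1) 0 - PySem.List.pyGetD (a :: b :: r) (i + 2) 0 - 1))
        (acc + (b - a - 1))
        = (PySem.List.pyRange 0 r.length 2).foldl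
        (fun m i => m + (PySem.List.pyGetD r (i + 1) 0 - PySem.List.pyGetD r i 0 - 1))
        (acc + (b - a - 1)) := by
      refine PySem.List.foldl_congr_mem _ _ _ _ fun m i hi => ?_
      have hi0 : 0 ≤ i := by
        have := (PySem.List.mem_pyRange_iff_of_pos (by norm_num) i).mp hi
        omega
      have e1 : i + 2 + 1 = (i + 2) + 1 := by ring
      rw [show i + 2 + 1 = (i + 1) + 1 + 1 by ring]
      rw [pyGetD_cons_succ (by omega), pyGetD_cons_succ (by omega)]
      rw [show i + 2 = (i + 1) + 1 by ring]
      rw [pyGetD_cons_succ (by omega), pyGetD_cons_succ hi0]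
    have heq : ((PySem.List.pyRange 0 r.length 2).foldl
        (fun m i => m + (PySem.List.pyGetD (a :: b :: r) (i + (2:Int) + 1) 0 - PySem.List.pyGetD (a :: b :: r) (i + 2) 0 - 1))
        (acc + (b - a - 1))) = acc + psVal (a :: b :: r) := by
      rw [hcongr, ih (by have := heven; simp at this; omega) (acc + (b - a - 1))]
      simp [psVal]; ring
    convert heq using 2

def freq0pv : PySem.Dict Int (List Int) := (PySem.Dict.empty.insert (-1) []).insert 1 []

lemma freq_getD (nums : List Int) (u : Int) :
    ((PySem.List.enumerate nums 0).foldl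
        (fun d p => d.modify p.2 [] (fun l => l ++ [p.1])) freq0pv).getD u []
      = freq0pv.getD u [] ++ idxOf u nums := by
  rw [show (fun (d : PySem.Dict Int (List Int)) (p : Int × Int) =>
        d.modify p.2 [] (fun l => l ++ [p.1]))
      = (fun d p => (fun (d : PySem.Dict Int (List Int)) (q : Int × Int) =>
        d.modify q.1 [] (fun l => l ++ [q.2])) d ((fun (p : Int × Int) => (p.2, p.1)) p)) from rfl]
  rw [← List.foldl_map (f := fun p : Int × Int => (p.2, p.1))
      (g := fun (d : PySem.Dict Int (List Int)) (q : Int × Int) => d.modify q.1 [] (fun l => l ++ [q.2]))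
      (l := PySem.List.enumerate nums 0) (init := freq0pv)]
  rw [PySem.Dict.getD_foldl_modify_append]
  congr 1
  unfold idxOf
  rw [List.filter_map, List.map_map]
  rfl

lemma foldl_add_of_mem : ∀ (xs : List Int) (s : PySem.Set Int), (∀ x ∈ xs, x ∈ s) →
    xs.foldl PySem.Set.add s = s := by
  intro xs
  induction xs with
  | nil => intro s _; rfl
  | cons x xs ih =>
    intro s h
    have hx' : x ∈ s := h x (by simp)
    have hx : PySem.Set.add s x = s := by
      simp [PySem.Set.add, hx']
    rw [List.foldl_cons, hx]
    exact ih s (fun y hy => h y (by simp [hy]))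

lemma freq_keys (nums : List Int) (hpre : ∀ x ∈ nums, x = 1 ∨ x = -1) :
    ((PySem.List.enumerate nums 0).foldl
        (fun d p => d.modify p.2 [] (fun l => l ++ [p.1])) freq0pv).keys = [-1, 1] := by
  rw [PySem.Dict.keys_foldl_modify_key (PySem.List.enumerate nums 0)
        (fun p : Int × Int => p.2) [] (fun d p => fun l => l ++ [p.1]) freq0pv]
  rw [PySem.List.map_snd_enumerate]
  have hk : freq0pv.keys = [-1, 1] := by decide
  rw [hk]
  show List.foldl PySem.Set.add [-1, 1] nums = [-1, 1]
  exact foldl_add_of_mem nums [-1, 1] (fun x hx => by rcases hpre x hx with rfl | rfl <;> decide)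

lemma floordiv_len (m : Nat) : PySem.Int.floordiv (m : Int) 2 = ((m / 2 : Nat) : Int) := by
  exact_mod_cast PySem.Int.floordiv_natCast m 2

lemma main_eq (nums : List Int) (k : Int) (hpre : ∀ x ∈ nums, x = 1 ∨ x = -1) :
    canMakeEqual nums k = canMakeEqual_alt nums k := by
  have hw1 : trueIdx (nums.map (fun x => x == -1)) = idxOf (-1) nums :=
    trueIdx_map_eq_idxOf (-1) nums
  have hw2 : trueIdx (nums.map (fun x => x == 1)) = idxOf 1 nums :=
    trueIdx_map_eq_idxOf 1 nums
  have hb1 : psOpt (idxOf (-1) nums)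
      = if (pp false (nums.map (fun x => x == -1))).2 then none
        else some (pp false (nums.map (fun x => x == -1))).1 := by
    rw [← hw1]; exact pp_false_eq _
  have hb2 : psOpt (idxOf 1 nums)
      = if (pp false (nums.map (fun x => x == 1))).2 then none
        else some (pp false (nums.map (fun x => x == 1))).1 := by
    rw [← hw2]; exact pp_false_eq _
  rw [psOpt_even_odd] at hb1 hb2
  have hbits : nums.map (fun x =>
        (((PySem.Dict.empty.insert 1 false).insert (-1) true) : PySem.Dict Int Bool).getD x false)
      = nums.map (fun x => x == -1) :=
    List.map_congr_left (fun x hx => by rcases hpre x hx with rfl | rfl <;> rfl)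
  have hmap : (nums.map (fun x => x == -1)).map (fun b => !b) = nums.map (fun x => x == 1) := by
    rw [List.map_map]
    exact List.map_congr_left (fun x hx => by rcases hpre x hx with rfl | rfl <;> rfl)
  simp only [canMakeEqual, canMakeEqual_alt]
  rw [show ((PySem.Dict.empty.insert (-1) ([] : List Int)).insert 1 []) = freq0pv from rfl]
  rw [freq_keys nums hpre]
  rw [freq_getD nums (-1), freq_getD nums 1]
  simp only [List.foldl_cons, List.foldl_nil]
  rw [freq_getD nums (-1), freq_getD nums 1]
  simp only [show freq0pv.getD (-1) [] = ([] : List Int) from rfl,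
    show freq0pv.getD 1 [] = ([] : List Int) from rfl, List.nil_append]
  -- B side: reduce the two inner folds to pp
  rw [hbits]
  simp only [Bool.xor_false, Bool.xor_true]
  rw [foldl_pp (nums.map (fun x => x == -1)) false 0]
  rw [show (fun (s : Bool × Int) (b : Bool) => (s.1 ^^ !b, s.2 + if s.1 ^^ !b then 1 else 0))
      = (fun s b => (fun (s : Bool × Int) (w : Bool) =>
          (s.1 ^^ w, s.2 + if s.1 ^^ w then 1 else 0)) s ((fun b => !b) b)) from rfl]
  rw [← List.foldl_map (f := fun b : Bool => !b)
      (g := fun (s : Bool × Int) (w : Bool) => (s.1 ^^ w, s.2 + if s.1 ^^ w then 1 else 0))]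
  rw [hmap, foldl_pp (nums.map (fun x => x == 1)) false 0]
  set L1 := idxOf (-1) nums with hL1
  set L2 := idxOf 1 nums with hL2
  set P1 := pp false (nums.map (fun x => x == -1)) with hP1
  set P2 := pp false (nums.map (fun x => x == 1)) with hP2
  by_cases h1 : L1.length % 2 = 0
  · rw [if_pos h1] at hb1
    set M1 : Int := psVal L1 + ((L1.length / 2 : Nat) : Int) with hM1
    have hpar1 : P1.2 = false := by
      by_contra h; rw [eq_true_of_ne_false h] at hb1; simp at hb1
    have hops1 : P1.1 = M1 := by
      rw [hpar1] at hb1; simpa using hb1.symm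
    by_cases h2 : L2.length % 2 = 0
    · rw [if_pos h2] at hb2
      set M2 : Int := psVal L2 + ((L2.length / 2 : Nat) : Int) with hM2
      have hpar2 : P2.2 = false := by
        by_contra h; rw [eq_true_of_ne_false h] at hb2; simp at hb2
      have hops2 : P2.1 = M2 := by
        rw [hpar2] at hb2; simpa using hb2.symm
      simp only [hpar1, hpar2, hops1, hops2]
      rw [if_neg (by simp; omega), if_pos (by simp [h2]), if_pos (by simp [h1])]
      rw [range_fold_eq_psVal L1 h1 0, range_fold_eq_psVal L2 h2 0, floordiv_len, floordiv_len]
      simp only [List.nil_append, zero_add, Bool.not_false, Bool.true_and]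
      rw [List.singleton_append, PySem.List.min?_id_cons]
      simp only [List.foldl_cons, List.foldl_nil]
      by_cases hm : M2 < M1
      · simp [hm]
        refine Bool.eq_iff_iff.mpr ?_
        simp only [Bool.or_eq_true, decide_eq_true_eq]
        rw [hM1, hM2] at hm
        rw [hM2]
        omega
      · simp [hm]
        refine Bool.eq_iff_iff.mpr ?_
        simp only [Bool.or_eq_true, decide_eq_true_eq]
        rw [hM1, hM2] at hm
        omega
    · rw [if_neg h2] at hb2
      have hpar2 : P2.2 = true := by
        by_contra h; rw [eq_false_of_ne_true h] at hb2; simp at hb2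
      simp only [hpar1, hpar2, hops1]
      rw [if_neg (by simp; omega), if_neg (by simp; omega), if_pos (by simp [h1])]
      rw [range_fold_eq_psVal L1 h1 0, floordiv_len]
      simp only [List.nil_append, zero_add, Bool.not_false, Bool.not_true, Bool.true_and,
        Bool.false_and]
      rw [PySem.List.min?_id_cons]
      simp
      rw [hM1]; omega
  · rw [if_neg h1] at hb1
    have hpar1 : P1.2 = true := by
      by_contra h; rw [eq_false_of_ne_true h] at hb1; simp at hb1
    by_cases h2 : L2.length % 2 = 0
    · rw [if_pos h2] at hb2
      set M2 : Int := psVal L2 + ((L2.length / 2 : Nat) : Int) with hM2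
      have hpar2 : P2.2 = false := by
        by_contra h; rw [eq_true_of_ne_false h] at hb2; simp at hb2
      have hops2 : P2.1 = M2 := by
        rw [hpar2] at hb2; simpa using hb2.symm
      simp only [hpar1, hpar2, hops2]
      rw [if_neg (by simp; omega), if_pos (by simp [h2]), if_neg (by simp; omega)]
      rw [range_fold_eq_psVal L2 h2 0, floordiv_len]
      simp only [List.nil_append, zero_add, Bool.not_false, Bool.not_true, Bool.true_and,
        Bool.false_and]
      rw [PySem.List.min?_id_cons]
      simp
      rw [hM2]; omega
    · rw [if_neg h2] at hb2
      have hpar2 : P2.2 = true := by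
        by_contra h; rw [eq_false_of_ne_true h] at hb2; simp at hb2
      simp only [hpar1, hpar2]
      rw [if_pos (by simp; omega)]
      simp

-- ===== VERDICT (by name: the statement is the Claim_ definition above) =====
theorem canMakeEqual_spec : Claim_equal_canMakeEqual := by
  intro nums k _ hpre
  exact main_eq nums k hpre
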